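-- pv_equiv track=rewrite | github.com/SergeyKrivohatskiy/dota2_matches_bot | telegram_bot/main.py | _generate_command_with_options_keyboard
-- ===== SOURCE A (Python) =====
-- import typing
--
-- def _generate_command_with_options_keyboard(buttons_per_line: int, command: str, options: typing.Dict[str, str]):
--     buttons = []
--     buttons_line = []
--     for option in sorted(options.keys()):
--         buttons_line.append((option, f'{command} {option}'))
--         if len(buttons_line) == buttons_per_line:
--             buttons.append(buttons_line)
--             buttons_line = []
--
--     if len(buttons_line) != 0:
--         buttons.append(buttons_line)
--
--     return buttons
-- ===== SOURCE B (Python) =====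
-- def _generate_command_with_options_keyboard(buttons_per_line: int, command: str, options):
--     pairs = [(option, f'{command} {option}') for option in sorted(options.keys())]
--     return [pairs[i:i + buttons_per_line] for i in range(0, len(pairs), buttons_per_line)]
-- ===== Notes on version B (the rewrite author's own statement) =====
-- stated objective: simpler
-- what changed: Builds the flat sorted pair list up front and cuts it into rows by index slicing, instead of appending one-by-one and flushing a line buffer on a counter.
-- outside the precondition, e.g. on _generate_command_with_options_keyboard(0, 'c', {'a': 'x', 'b': 'y'}): A returns [[('a', 'c a'), ('b', 'c b')]], B raises ValueError; on _generate_command_with_options_keyboard(-1, 'c', {'a': 'x', 'b': 'y'}): A returns [[('a', 'c a'), ('b', 'c b')]], B returns []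
import Mathlib
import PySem

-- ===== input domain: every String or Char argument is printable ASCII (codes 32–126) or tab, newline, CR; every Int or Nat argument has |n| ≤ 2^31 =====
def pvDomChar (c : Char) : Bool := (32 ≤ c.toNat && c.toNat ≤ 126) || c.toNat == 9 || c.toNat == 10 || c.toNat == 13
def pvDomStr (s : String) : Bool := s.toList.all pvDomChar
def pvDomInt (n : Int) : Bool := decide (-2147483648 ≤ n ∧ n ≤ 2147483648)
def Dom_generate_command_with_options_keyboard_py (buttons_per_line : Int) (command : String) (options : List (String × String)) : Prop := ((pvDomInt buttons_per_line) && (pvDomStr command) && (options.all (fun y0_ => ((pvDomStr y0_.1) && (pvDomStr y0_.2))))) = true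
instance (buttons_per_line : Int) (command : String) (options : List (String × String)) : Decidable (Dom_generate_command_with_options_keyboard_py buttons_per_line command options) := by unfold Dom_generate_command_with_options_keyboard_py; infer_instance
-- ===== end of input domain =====

-- B builds the flat sorted pair list and slices it into rows by index, replacing A's
-- append-and-flush line buffer: same rows, a simpler decomposition (objective: simpler).

-- ===== PORT A =====
-- literal port of A: fold over sorted(options.keys()) appending to a line buffer,
-- flushing when the buffer length hits buttons_per_line, then flushing the remainder
def generate_command_with_options_keyboard_py (buttons_per_line : Int) (command : String) (options : List (String × String)) : List (List (String × String)) :=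
  let keys := PySem.List.sorted (PySem.List.dedup (options.map Prod.fst)) (fun x => x) false
  let st := keys.foldl
    (fun (acc : List (List (String × String)) × List (String × String)) o =>
      let line := acc.2 ++ [(o, command ++ " " ++ o)]
      if (line.length : Int) = buttons_per_line then (acc.1 ++ [line], []) else (acc.1, line))
    ([], [])
  if st.2.length ≠ 0 then st.1 ++ [st.2] else st.1

-- ===== PORT B =====
-- literal port of B: the flat pair list, then one slice per range(0, len, buttons_per_line)
def generate_command_with_options_keyboard_py_alt (buttons_per_line : Int) (command : String) (options : List (String × String)) : List (List (String × String)) :=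
  let keys := PySem.List.sorted (PySem.List.dedup (options.map Prod.fst)) (fun x => x) false
  let pairs := keys.map (fun o => (o, command ++ " " ++ o))
  (PySem.List.pyRange 0 (pairs.length : Int) buttons_per_line).map
    (fun i => PySem.List.slice pairs (some i) (some (i + buttons_per_line)))

-- ===== PRECONDITION & SPEC =====
-- Pre_ excludes buttons_per_line < 1, where A's all-in-one-row result is an accident of its
-- counter never reaching the target and B's slicing raises ValueError (step 0) or yields an
-- empty range (negative step).
def Pre_generate_command_with_options_keyboard_py (buttons_per_line : Int) (command : String) (options : List (String × String)) : Prop := 1 ≤ buttons_per_line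
instance (buttons_per_line : Int) (command : String) (options : List (String × String)) : Decidable (Pre_generate_command_with_options_keyboard_py buttons_per_line command options) := by unfold Pre_generate_command_with_options_keyboard_py; infer_instance

def pvWitness_generate_command_with_options_keyboard_py : Int × String × (List (String × String)) := (2, "cmd", [("b", "1"), ("a", "2"), ("c", "3")])

def Spec_generate_command_with_options_keyboard_py (buttons_per_line : Int) (command : String) (options : List (String × String)) (out : List (List (String × String))) : Prop := out = generate_command_with_options_keyboard_py_alt buttons_per_line command options
instance (buttons_per_line : Int) (command : String) (options : List (String × String)) (out : List (List (String × String))) : Decidable (Spec_generate_command_with_options_keyboard_py buttons_per_line command options out) := by unfold Spec_generate_command_with_options_keyboard_py; infer_instance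

-- ===== CLAIM (what is proved, stated in full; the proofs are below) =====
def Claim_equal_generate_command_with_options_keyboard_py : Prop := ∀ (buttons_per_line : Int) (command : String) (options : List (String × String)), Dom_generate_command_with_options_keyboard_py buttons_per_line command options → Pre_generate_command_with_options_keyboard_py buttons_per_line command options → Spec_generate_command_with_options_keyboard_py buttons_per_line command options (generate_command_with_options_keyboard_py buttons_per_line command options)

-- ===== LEMMAS AND PROOFS =====

-- A's loop body and final flush, over a generic element type
def pvStepA {α : Type} (n : Int) (acc : List (List α) × List α) (x : α) : List (List α) × List α :=
  let line := acc.2 ++ [x]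
  if (line.length : Int) = n then (acc.1 ++ [line], []) else (acc.1, line)

def pvFinA {α : Type} (st : List (List α) × List α) : List (List α) :=
  if st.2.length ≠ 0 then st.1 ++ [st.2] else st.1

-- B's slicing, over a generic element type
def pvChunksB {α : Type} (n : Int) (l : List α) : List (List α) :=
  (PySem.List.pyRange 0 (l.length : Int) n).map (fun i => PySem.List.slice l (some i) (some (i + n)))

theorem pvRange_pos_nil (s b : Int) (hs : 0 < s) (hb : b ≤ 0) :
    PySem.List.pyRange 0 b s = [] := by
  rw [PySem.List.pyRange_of_pos _ _ hs]
  simp [show ¬ (0:Int) < b by omega]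

theorem pvRange_pos_cons (s b : Int) (hs : 0 < s) (hb : 0 < b) :
    PySem.List.pyRange 0 b s = 0 :: (PySem.List.pyRange 0 (b - s) s).map (· + s) := by
  rw [PySem.List.pyRange_of_pos _ _ hs, PySem.List.pyRange_of_pos _ _ hs]
  have key : (if (0:Int) < b then ((b - 0 + s - 1) / s).toNat else 0)
      = (if (0:Int) < b - s then ((b - s - 0 + s - 1) / s).toNat else 0) + 1 := by
    by_cases hbs : s < b
    · have e : (b - 0 + s - 1) / s = (b - s - 0 + s - 1) / s + 1 := by
        have h := Int.add_mul_ediv_right (b - 1) 1 (by omega : s ≠ 0)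
        have e1 : b - 1 + 1 * s = b - 0 + s - 1 := by ring
        have e2 : b - s - 0 + s - 1 = b - 1 := by ring
        rw [e1] at h; rw [e2]; omega
      have hnn : 0 ≤ (b - s - 0 + s - 1) / s := Int.ediv_nonneg (by omega) (by omega)
      simp only [hb, if_pos, show (0:Int) < b - s by omega]
      omega
    · have h1 : (1:Int) ≤ (b - 0 + s - 1) / s := by
        rw [Int.le_ediv_iff_mul_le hs]; omega
      have h2 : (b - 0 + s - 1) / s < 2 := by
        rw [Int.ediv_lt_iff_lt_mul hs]; omega
      simp only [hb, if_pos, show ¬ (0:Int) < b - s by omega, if_neg, not_false_iff]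
      omega
  rw [key, List.range_succ_eq_map]
  simp only [List.map_cons, List.map_map, Nat.cast_zero, mul_zero, add_zero]
  congr 1
  apply List.map_congr_left
  intro k _
  simp only [Function.comp_apply]
  push_cast
  ring

theorem pvChunksB_cons {α : Type} (m : Nat) (h1 : 1 ≤ m) (l : List α) (hl : l ≠ []) :
    pvChunksB (m : Int) l = l.take m :: pvChunksB (m : Int) (l.drop m) := by
  have hm0 : (0:Int) < (m : Int) := by exact_mod_cast h1
  have hlen : 0 < l.length := List.length_pos_of_ne_nil hl
  unfold pvChunksB
  rw [pvRange_pos_cons _ _ hm0 (by exact_mod_cast hlen)]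
  simp only [List.map_cons, List.map_map]
  have hhead : PySem.List.slice l (some 0) (some (0 + (m:Int))) = l.take m := by
    rw [zero_add, PySem.List.slice_toNat l (le_refl 0) (by omega)]
    simp
  rw [hhead]
  congr 1
  by_cases hml : m ≤ l.length
  · have hb : ((l.drop m).length : Int) = (l.length : Int) - (m : Int) := by
      simp [List.length_drop]; omega
    rw [hb]
    apply List.map_congr_left
    intro i hi
    have hi0 : 0 ≤ i := ((PySem.List.mem_pyRange_iff_of_pos hm0 i).1 hi).1
    simp only [Function.comp_apply]
    rw [PySem.List.slice_toNat _ (by omega) (by omega),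
        PySem.List.slice_toNat _ (by omega) (by omega)]
    rw [List.drop_drop]
    congr 1
    · omega
    · congr 1; omega
  · have h2 : l.drop m = [] := List.drop_eq_nil_of_le (by omega)
    rw [h2]
    simp only [List.length_nil, Nat.cast_zero]
    rw [pvRange_pos_nil _ _ hm0 (by omega), pvRange_pos_nil _ _ hm0 (le_refl 0)]
    simp

theorem pvFoldA_split {α : Type} (m : Nat) (l : List α) :
    ∀ (ln : List α) (bs : List (List α)), ln.length < m →
    l.foldl (pvStepA (m : Int)) (bs, ln) =
      if ln.length + l.length < m then (bs, ln ++ l)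
      else (l.drop (m - ln.length)).foldl (pvStepA (m : Int)) (bs ++ [ln ++ l.take (m - ln.length)], []) := by
  induction l with
  | nil =>
    intro ln bs hln
    simp only [List.foldl_nil, List.length_nil, Nat.add_zero, if_pos hln, List.append_nil]
  | cons x xs ih =>
    intro ln bs hln
    rw [List.foldl_cons]
    by_cases hc : ln.length + 1 = m
    · have hstep : pvStepA ((m:Nat) : Int) (bs, ln) x = (bs ++ [ln ++ [x]], []) := by
        simp only [pvStepA, List.length_append, List.length_cons, List.length_nil, Nat.cast_inj]
        rw [if_pos (by exact_mod_cast hc)]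
      rw [hstep]
      have hcond : ¬ (ln.length + (x :: xs).length < m) := by simp; omega
      rw [if_neg hcond]
      have hsub : m - ln.length = 1 := by omega
      rw [hsub]
      simp
    · have hstep : pvStepA ((m:Nat) : Int) (bs, ln) x = (bs, ln ++ [x]) := by
        simp only [pvStepA, List.length_append, List.length_cons, List.length_nil, Nat.cast_inj]
        rw [if_neg (by exact_mod_cast (by omega : ¬ (ln.length + 1 = m)))]
      rw [hstep]
      rw [ih (ln ++ [x]) bs (by simp; omega)]
      have hsub : m - ln.length = (m - (ln.length + 1)) + 1 := by omega
      by_cases hcond : ln.length + 1 + xs.length < m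
      · rw [if_pos (by simpa using hcond), if_pos (by simp; omega)]
        simp
      · rw [if_neg (by simpa using hcond), if_neg (by simp; omega)]
        rw [hsub]
        simp [List.take_succ_cons, List.drop_succ_cons]

theorem pvFinA_foldA_aux {α : Type} (m : Nat) (h1 : 1 ≤ m) :
    ∀ (N : Nat) (l : List α), l.length ≤ N → ∀ (bs : List (List α)),
    pvFinA (l.foldl (pvStepA (m : Int)) (bs, [])) = bs ++ pvChunksB (m : Int) l := by
  intro N
  induction N with
  | zero =>
    intro l hl bs
    have hnil : l = [] := List.eq_nil_of_length_eq_zero (by omega)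
    subst hnil
    simp [pvFinA, pvChunksB, pvRange_pos_nil _ _ (by exact_mod_cast h1 : (0:Int) < (m:Int)) (le_refl 0)]
  | succ N ih =>
    intro l hl bs
    match l with
    | [] =>
      simp [pvFinA, pvChunksB, pvRange_pos_nil _ _ (by exact_mod_cast h1 : (0:Int) < (m:Int)) (le_refl 0)]
    | x :: xs =>
      rw [pvFoldA_split m (x :: xs) [] bs (by simp; omega)]
      rw [pvChunksB_cons m h1 (x :: xs) (by simp)]
      simp only [List.length_nil, Nat.zero_add, Nat.sub_zero, List.nil_append]
      by_cases hlen : (x :: xs).length < m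
      · rw [if_pos hlen]
        have ht : (x :: xs).take m = x :: xs := List.take_of_length_le (by omega)
        have hd : (x :: xs).drop m = [] := List.drop_eq_nil_of_le (by omega)
        rw [ht, hd]
        simp [pvFinA, pvChunksB, pvRange_pos_nil _ _ (by exact_mod_cast h1 : (0:Int) < (m:Int)) (le_refl 0)]
      · rw [if_neg hlen]
        rw [ih ((x :: xs).drop m) (by simp at hl ⊢; omega) (bs ++ [(x :: xs).take m])]
        simp

theorem pvMain {α : Type} (m : Nat) (h1 : 1 ≤ m) (l : List α) :
    (if (l.foldl (pvStepA (m : Int)) ([], [])).2.length ≠ 0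
      then (l.foldl (pvStepA (m : Int)) ([], [])).1 ++ [(l.foldl (pvStepA (m : Int)) ([], [])).2]
      else (l.foldl (pvStepA (m : Int)) ([], [])).1)
    = (PySem.List.pyRange 0 (l.length : Int) (m : Int)).map
        (fun i => PySem.List.slice l (some i) (some (i + (m : Int)))) := by
  have h := pvFinA_foldA_aux m h1 l.length l (le_refl _) []
  simpa [pvFinA, pvChunksB] using h

-- ===== VERDICT (by name: the statement is the Claim_ definition above) =====
theorem generate_command_with_options_keyboard_py_spec : Claim_equal_generate_command_with_options_keyboard_py := by
  intro n command options _ hpre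
  have hn1 : 1 ≤ n := hpre
  have hm : n = ((n.toNat : Nat) : Int) := by omega
  set m : Nat := n.toNat with hmdef
  have h1 : 1 ≤ m := by omega
  unfold Spec_generate_command_with_options_keyboard_py
  unfold generate_command_with_options_keyboard_py generate_command_with_options_keyboard_py_alt
  rw [hm]
  have bridgeA :
      (PySem.List.sorted (PySem.List.dedup (options.map Prod.fst)) (fun x => x) false).foldl
        (fun (acc : List (List (String × String)) × List (String × String)) o =>
          let line := acc.2 ++ [(o, command ++ " " ++ o)]
          if (line.length : Int) = ((m : Nat) : Int) then (acc.1 ++ [line], []) else (acc.1, line))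
        ([], [])
      = ((PySem.List.sorted (PySem.List.dedup (options.map Prod.fst)) (fun x => x) false).map
          (fun o => (o, command ++ " " ++ o))).foldl (pvStepA ((m : Nat) : Int)) ([], []) := by
    rw [List.foldl_map]; rfl
  simp only [bridgeA]
  exact pvMain m h1 _
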